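-- pv_equiv track=rewrite | github.com/tbk81/Advent-of-Code | 2015/D3/main.py | coord_maker
-- ===== SOURCE A (Python) =====
-- def coord_maker(li):
--     coord_li = [(0, 0)]
--     current_coord = [0, 0]
--     for i in range(len(li)):
--         if li[i] == ">":
--             current_coord[0] += 1
--             coord_li.append((current_coord[0], current_coord[1]))
--         elif li[i] == "<":
--             current_coord[0] -= 1
--             coord_li.append((current_coord[0], current_coord[1]))
--         elif li[i] == "^":
--             current_coord[1] += 1
--             coord_li.append((current_coord[0], current_coord[1]))
--         elif li[i] == "v":
--             current_coord[1] -= 1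
--             coord_li.append((current_coord[0], current_coord[1]))
--     return coord_li
-- ===== SOURCE B (Python) =====
-- _DELTAS = {'>': (1, 0), '<': (-1, 0), '^': (0, 1), 'v': (0, -1)}
--
--
-- def _prefix_sums(vals):
--     out = [0]
--     s = 0
--     for v in vals:
--         s += v
--         out.append(s)
--     return out
--
--
-- def coord_maker(li):
--     moves = [_DELTAS[c] for c in li if c in _DELTAS]
--     xs = _prefix_sums([d[0] for d in moves])
--     ys = _prefix_sums([d[1] for d in moves])
--     return list(zip(xs, ys))
-- ===== Notes on version B (the rewrite author's own statement) =====
-- stated objective: alternative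
-- what changed: Replaces the interleaved branch-and-append walk with a delta table (filter/map the string to move vectors), then componentwise prefix sums for x and y zipped together.
import Mathlib
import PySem

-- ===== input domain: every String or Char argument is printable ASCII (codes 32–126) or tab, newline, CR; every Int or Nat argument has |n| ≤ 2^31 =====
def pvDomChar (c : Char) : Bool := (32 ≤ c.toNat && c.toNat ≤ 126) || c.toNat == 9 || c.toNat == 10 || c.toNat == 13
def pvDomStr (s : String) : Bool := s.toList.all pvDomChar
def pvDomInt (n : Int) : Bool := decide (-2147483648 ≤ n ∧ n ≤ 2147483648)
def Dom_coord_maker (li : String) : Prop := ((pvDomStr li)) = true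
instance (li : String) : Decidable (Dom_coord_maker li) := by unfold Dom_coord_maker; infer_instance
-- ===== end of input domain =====

-- ===== PORT A =====
def coordLoop : List Char → List (Int × Int) → (Int × Int) → List (Int × Int)
  | [], acc, _ => acc
  | c :: cs, acc, cur =>
    if c = '>' then coordLoop cs (acc ++ [(cur.1 + 1, cur.2)]) (cur.1 + 1, cur.2)
    else if c = '<' then coordLoop cs (acc ++ [(cur.1 - 1, cur.2)]) (cur.1 - 1, cur.2)
    else if c = '^' then coordLoop cs (acc ++ [(cur.1, cur.2 + 1)]) (cur.1, cur.2 + 1)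
    else if c = 'v' then coordLoop cs (acc ++ [(cur.1, cur.2 - 1)]) (cur.1, cur.2 - 1)
    else coordLoop cs acc cur

def coord_maker (li : String) : List (Int × Int) :=
  coordLoop li.toList [(0, 0)] (0, 0)

-- ===== PORT B =====
-- delta table: move vector for each direction character, none for anything else
def deltaOf (c : Char) : Option (Int × Int) :=
  if c = '>' then some (1, 0)
  else if c = '<' then some (-1, 0)
  else if c = '^' then some (0, 1)
  else if c = 'v' then some (0, -1)
  else none

-- running sums starting from s (the values after each addition)
def psums (s : Int) : List Int → List Int
  | [] => []
  | d :: ds => (s + d) :: psums (s + d) ds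

def prefixSums (vals : List Int) : List Int := 0 :: psums 0 vals

def coord_maker_alt (li : String) : List (Int × Int) :=
  let moves := li.toList.filterMap deltaOf
  (prefixSums (moves.map Prod.fst)).zip (prefixSums (moves.map Prod.snd))

-- ===== PRECONDITION & SPEC =====
def Spec_coord_maker (li : String) (out : List (Int × Int)) : Prop := out = coord_maker_alt li
instance (li : String) (out : List (Int × Int)) : Decidable (Spec_coord_maker li out) := by unfold Spec_coord_maker; infer_instance

-- ===== CLAIM (what is proved, stated in full; the proofs are below) =====
def Claim_equal_coord_maker : Prop := ∀ (li : String), Dom_coord_maker li → Spec_coord_maker li (coord_maker li)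

-- ===== LEMMAS AND PROOFS =====
lemma coordLoop_eq (cs : List Char) : ∀ (acc : List (Int × Int)) (cur : Int × Int),
    coordLoop cs acc cur =
      acc ++ List.zip (psums cur.1 ((cs.filterMap deltaOf).map Prod.fst))
                      (psums cur.2 ((cs.filterMap deltaOf).map Prod.snd)) := by
  induction cs with
  | nil => intro acc cur; simp [coordLoop, psums]
  | cons c cs ih =>
    intro acc cur
    by_cases h1 : c = '>'
    · simp [coordLoop, deltaOf, h1, ih, psums, List.zip]
    · by_cases h2 : c = '<'
      · simp [coordLoop, deltaOf, h2, ih, psums, List.zip, sub_eq_add_neg]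
      · by_cases h3 : c = '^'
        · simp [coordLoop, deltaOf, h3, ih, psums, List.zip]
        · by_cases h4 : c = 'v'
          · simp [coordLoop, deltaOf, h4, ih, psums, List.zip, sub_eq_add_neg]
          · simp [coordLoop, deltaOf, h1, h2, h3, h4, ih]

-- ===== VERDICT (by name: the statement is the Claim_ definition above) =====
theorem coord_maker_spec : Claim_equal_coord_maker := by
  intro li _
  unfold Spec_coord_maker coord_maker coord_maker_alt prefixSums
  rw [coordLoop_eq]
  simp [List.zip]
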